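-- pv_equiv track=rewrite | github.com/alannesta/algo4 | src/python/data_structure/stack/1209_remove_adjacent_dup.py | clear_stack
-- ===== SOURCE A (Python) =====
-- def clear_stack(stack, k, char):
--     poped = []
--     cleared = True
--     while k > 1:
--         if not stack:
--             # restore stack
--             while poped:
--                 stack.append(poped.pop())
--             cleared = False
--             break
--
--         if stack[-1] == char:
--             elem = stack.pop()
--             poped.append(elem)
--             k -= 1
--         else:
--             # restore stack
--             while poped:
--                 stack.append(poped.pop())
--             cleared = False
--             break
--
--     return cleared
-- ===== SOURCE B (Python) =====
-- def clear_stack(stack, k, char):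
--     n = k - 1
--     if n <= 0:
--         return True
--     if len(stack) < n:
--         return False
--     if all(x == char for x in stack[-n:]):
--         del stack[-n:]
--         return True
--     return False
-- ===== Notes on version B (the rewrite author's own statement) =====
-- stated objective: simpler
-- what changed: Replaces A's one-at-a-time pop loop with a rollback buffer by a single bulk check of the top k-1 elements followed by one bulk deletion; failure paths never touch the stack.
import Mathlib
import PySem

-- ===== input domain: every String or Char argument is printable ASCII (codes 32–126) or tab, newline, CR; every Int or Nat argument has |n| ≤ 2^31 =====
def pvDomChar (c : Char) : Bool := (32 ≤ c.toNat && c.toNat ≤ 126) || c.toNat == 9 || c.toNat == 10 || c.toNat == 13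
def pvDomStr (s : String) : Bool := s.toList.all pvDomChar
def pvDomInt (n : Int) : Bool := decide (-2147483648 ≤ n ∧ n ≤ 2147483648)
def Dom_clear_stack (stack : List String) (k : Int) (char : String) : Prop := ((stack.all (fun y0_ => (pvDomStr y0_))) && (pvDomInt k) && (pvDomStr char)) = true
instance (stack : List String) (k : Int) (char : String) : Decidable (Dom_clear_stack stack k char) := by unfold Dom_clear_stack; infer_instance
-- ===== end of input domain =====

-- B: one bulk check of the top k-1 elements plus one bulk deletion instead of A's pop-one-at-a-time
-- loop with a rollback buffer; equivalence is proved about the RETURN value (in Python both mutate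
-- the caller's list identically: k-1 elements removed on success, untouched on failure).

-- ===== PORT A =====
-- the `while k > 1` loop: pop stack[-1] into poped while it equals char, else restore and break
def clear_stack_loop (char : String) (stack poped : List String) (k : Int) : Bool :=
  if k > 1 then
    if he : stack.isEmpty then
      false                    -- `if not stack`: restore poped, cleared = False, break
    else
      let elem := stack.getLast (by simpa [List.isEmpty_iff] using he)
      if elem == char then
        clear_stack_loop char stack.dropLast (elem :: poped) (k - 1)
      else false               -- restore poped, cleared = False, break
  else true
termination_by stack.length
decreasing_by
  have hne : stack ≠ [] := by simpa [List.isEmpty_iff] using he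
  have := List.length_pos_of_ne_nil hne
  simp only [List.length_dropLast]
  omega

def clear_stack (stack : List String) (k : Int) (char : String) : Bool :=
  clear_stack_loop char stack [] k

-- ===== PORT B =====
def clear_stack_alt (stack : List String) (k : Int) (char : String) : Bool :=
  let n := k - 1
  if n ≤ 0 then true
  else if (stack.length : Int) < n then false
  else
    -- stack[-n:] with 1 ≤ n ≤ len(stack): exactly the last n elements
    (stack.drop (stack.length - n.toNat)).all (· == char)

-- ===== PRECONDITION & SPEC =====
def Spec_clear_stack (stack : List String) (k : Int) (char : String) (out : Bool) : Prop := out = clear_stack_alt stack k char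
instance (stack : List String) (k : Int) (char : String) (out : Bool) : Decidable (Spec_clear_stack stack k char out) := by unfold Spec_clear_stack; infer_instance

-- ===== CLAIM (what is proved, stated in full; the proofs are below) =====
def Claim_equal_clear_stack : Prop := ∀ (stack : List String) (k : Int) (char : String), Dom_clear_stack stack k char → Spec_clear_stack stack k char (clear_stack stack k char)

-- ===== LEMMAS AND PROOFS =====

-- B's recurrence when peeling the top (last) element, for k > 1
lemma alt_append_last (init : List String) (x char : String) (k : Int) (hk : 1 < k) :
    clear_stack_alt (init ++ [x]) k char
      = ((x == char) && clear_stack_alt init (k - 1) char) := by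
  have hn : ¬ (k - 1 ≤ 0) := by omega
  simp only [clear_stack_alt]
  rw [if_neg hn]
  by_cases hbig : (((init ++ [x]).length : Nat) : Int) < k - 1
  · rw [if_pos hbig]
    rw [show (init ++ [x]).length = init.length + 1 by simp] at hbig
    push_cast at hbig
    have hk2 : ¬ (k - 1 - 1 ≤ 0) := by omega
    rw [if_neg hk2, if_pos (show ((init.length : Nat) : Int) < k - 1 - 1 by omega)]
    simp
  · rw [if_neg hbig]
    rw [show (init ++ [x]).length = init.length + 1 by simp] at hbig ⊢
    push_cast at hbig
    have hm : init.length + 1 - (k - 1).toNat ≤ init.length := by omega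
    rw [List.drop_append_of_le_length hm, List.all_append]
    simp only [List.all_cons, List.all_nil, Bool.and_true]
    by_cases hk2 : k - 1 - 1 ≤ 0
    · rw [if_pos hk2]
      have h1 : (k - 1).toNat = 1 := by omega
      rw [h1, Nat.add_sub_cancel, List.drop_length]
      simp [Bool.and_comm]
    · rw [if_neg hk2, if_neg (show ¬ (((init.length : Nat) : Int) < k - 1 - 1) by omega)]
      rw [show init.length + 1 - (k - 1).toNat = init.length - (k - 1 - 1).toNat by omega]
      exact Bool.and_comm _ _

lemma loop_eq_alt (char : String) (stack poped : List String) (k : Int) :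
    clear_stack_loop char stack poped k = clear_stack_alt stack k char := by
  induction stack using List.reverseRecOn generalizing poped k with
  | nil =>
    rw [clear_stack_loop.eq_def]
    simp only [clear_stack_alt, List.isEmpty_nil, List.length_nil, dite_true]
    by_cases hk : k > 1
    · rw [if_pos hk, if_neg (show ¬ (k - 1 ≤ 0) by omega),
        if_pos (show (((0 : Nat) : Int)) < k - 1 by omega)]
    · rw [if_neg hk, if_pos (show k - 1 ≤ 0 by omega)]
  | append_singleton init x ih =>
    rw [clear_stack_loop.eq_def]
    by_cases hk : k > 1
    · rw [alt_append_last init x char k hk]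
      rw [if_pos hk, dif_neg (by simp)]
      simp only [List.getLast_concat, List.dropLast_concat]
      by_cases hx : (x == char) = true
      · rw [if_pos hx, hx, Bool.true_and]
        exact ih _ _
      · have hxf : (x == char) = false := by simpa using hx
        rw [if_neg hx, hxf, Bool.false_and]
    · rw [if_neg hk]
      simp only [clear_stack_alt]
      rw [if_pos (show k - 1 ≤ 0 by omega)]

-- ===== VERDICT (by name: the statement is the Claim_ definition above) =====
theorem clear_stack_spec : Claim_equal_clear_stack := by
  intro stack k char _
  unfold Spec_clear_stack clear_stack
  exact loop_eq_alt char stack [] k
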